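-- pv_equiv track=rewrite | github.com/KhaledElTahan/Stanford-CS224n-SQUAD | setup.py | _create_segment_ids
-- ===== SOURCE A (Python) =====
-- def _create_segment_ids(tokens):
--     ids = [0] * len(tokens)
--
--     bit = 0
--     for i in range(len(tokens)):
--         ids[i] = bit
--
--         if tokens[i] == "[SEP]":
--             bit = 1 - bit
--
--     return ids
-- ===== SOURCE B (Python) =====
-- def _create_segment_ids(tokens):
--     n = len(tokens)
--     seps = [i for i, t in enumerate(tokens) if t == "[SEP]"]
--     ids = []
--     bit = 0
--     prev = 0
--     for s in seps:
--         ids.extend([bit] * (s + 1 - prev))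
--         prev = s + 1
--         bit = 1 - bit
--     ids.extend([bit] * (n - prev))
--     return ids
-- ===== Notes on version B (the rewrite author's own statement) =====
-- stated objective: alternative
-- what changed: B first collects the indices of '[SEP]' tokens, then block-fills each delimited segment (including the trailing one) with its alternating bit via list-replication, instead of A's per-token toggle loop with index assignment.
import Mathlib
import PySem

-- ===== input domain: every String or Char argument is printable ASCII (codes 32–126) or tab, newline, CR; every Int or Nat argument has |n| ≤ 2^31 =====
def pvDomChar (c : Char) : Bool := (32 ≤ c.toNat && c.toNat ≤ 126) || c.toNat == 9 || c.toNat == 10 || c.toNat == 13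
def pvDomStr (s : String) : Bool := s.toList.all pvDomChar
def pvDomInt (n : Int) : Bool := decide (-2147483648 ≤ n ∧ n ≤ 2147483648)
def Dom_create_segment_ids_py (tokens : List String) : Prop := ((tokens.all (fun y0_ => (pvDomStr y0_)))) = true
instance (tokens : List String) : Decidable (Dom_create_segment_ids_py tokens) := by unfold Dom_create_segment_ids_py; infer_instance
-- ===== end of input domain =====

-- B collects the '[SEP]' indices first and block-fills the segments between them; same O(n) cost, different decomposition.

-- ===== PORT A =====
-- A's loop writes the current bit at each position and toggles it after a '[SEP]';
-- ported as structural recursion carrying the bit.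
def pvAGo (tokens : List String) (bit : Int) : List Int :=
  match tokens with
  | [] => []
  | t :: ts => bit :: pvAGo ts (if t = "[SEP]" then 1 - bit else bit)

def create_segment_ids_py (tokens : List String) : List Int :=
  pvAGo tokens 0

-- ===== PORT B =====
-- the comprehension collecting the indices of '[SEP]' (enumeration counter k)
def pvSeps (k : Nat) (ts : List String) : List Nat :=
  match ts with
  | [] => []
  | t :: ts => if t = "[SEP]" then k :: pvSeps (k + 1) ts else pvSeps (k + 1) ts

-- B's fill loop over the sep indices, then the trailing segment
def pvBGo (seps : List Nat) (prev : Nat) (bit : Int) (n : Nat) : List Int :=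
  match seps with
  | [] => List.replicate (n - prev) bit
  | s :: rest => List.replicate (s + 1 - prev) bit ++ pvBGo rest (s + 1) (1 - bit) n

def create_segment_ids_py_alt (tokens : List String) : List Int :=
  pvBGo (pvSeps 0 tokens) 0 0 tokens.length

-- ===== PRECONDITION & SPEC =====
def Spec_create_segment_ids_py (tokens : List String) (out : List Int) : Prop := out = create_segment_ids_py_alt tokens
instance (tokens : List String) (out : List Int) : Decidable (Spec_create_segment_ids_py tokens out) := by unfold Spec_create_segment_ids_py; infer_instance

-- ===== CLAIM (what is proved, stated in full; the proofs are below) =====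
def Claim_equal_create_segment_ids_py : Prop := ∀ (tokens : List String), Dom_create_segment_ids_py tokens → Spec_create_segment_ids_py tokens (create_segment_ids_py tokens)

-- ===== LEMMAS AND PROOFS =====

theorem pvSeps_ge (ts : List String) : ∀ k s, s ∈ pvSeps k ts → k ≤ s := by
  induction ts with
  | nil => intro k s h; simp [pvSeps] at h
  | cons t ts ih =>
    intro k s h
    by_cases ht : t = "[SEP]" <;> simp [pvSeps, ht] at h
    · rcases h with rfl | h
      · exact le_refl _
      · exact Nat.le_of_succ_le (ih (k + 1) s h)
    · exact Nat.le_of_succ_le (ih (k + 1) s h)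

theorem pvBGo_shift (seps : List Nat) (k : Nat) (bit : Int) (n : Nat)
    (hn : k + 1 ≤ n) (hs : ∀ s ∈ seps, k + 1 ≤ s) :
    pvBGo seps k bit n = bit :: pvBGo seps (k + 1) bit n := by
  cases seps with
  | nil =>
    have : n - k = (n - (k + 1)) + 1 := by omega
    simp [pvBGo, this, List.replicate_succ]
  | cons s rest =>
    have hk : k + 1 ≤ s := hs s (by simp)
    have : s + 1 - k = (s + 1 - (k + 1)) + 1 := by omega
    simp [pvBGo, this, List.replicate_succ]

theorem pvMain (ts : List String) : ∀ k bit,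
    pvBGo (pvSeps k ts) k bit (k + ts.length) = pvAGo ts bit := by
  induction ts with
  | nil => intro k bit; simp [pvSeps, pvBGo, pvAGo]
  | cons t ts ih =>
    intro k bit
    have e : k + (t :: ts).length = (k + 1) + ts.length := by simp; omega
    rw [e]
    by_cases ht : t = "[SEP]"
    · have hsep : pvSeps k (t :: ts) = k :: pvSeps (k + 1) ts := by simp [pvSeps, ht]
      rw [hsep, pvBGo, show k + 1 - k = 1 from by omega, ih (k + 1) (1 - bit)]
      simp [pvAGo, ht]
    · have hsep : pvSeps k (t :: ts) = pvSeps (k + 1) ts := by simp [pvSeps, ht]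
      rw [hsep, pvBGo_shift _ k bit ((k + 1) + ts.length) (by omega) (pvSeps_ge ts (k + 1)),
        ih (k + 1) bit]
      simp [pvAGo, ht]

-- ===== VERDICT (by name: the statement is the Claim_ definition above) =====
theorem create_segment_ids_py_spec : Claim_equal_create_segment_ids_py := by
  intro tokens _
  unfold Spec_create_segment_ids_py create_segment_ids_py create_segment_ids_py_alt
  simpa using (pvMain tokens 0 0).symm
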